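-- pv_equiv track=rewrite | github.com/ThQ/p8ste | src/page/pastes/paste/__init__.py | format_line_start
-- ===== SOURCE A (Python) =====
-- def format_line_start(line):
--     result = ""
--     i = 0
--     for c in line:
--         if c == " ":
--             result += "&nbsp;"
--         elif c == "\t":
--             result += "&nbsp;&nbsp;&nbsp;"
--         else:
--             result += line[i:]
--             break;
--         i += 1
--     return result
-- ===== SOURCE B (Python) =====
-- def format_line_start(line):
--     # Two phases: first find the end of the leading run of spaces/tabs,
--     # then translate that prefix in bulk and glue the untouched rest back on.
--     i = 0
--     while i < len(line) and line[i] in (" ", "\t"):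
--         i += 1
--     prefix, rest = line[:i], line[i:]
--     return "".join("&nbsp;&nbsp;&nbsp;" if c == "\t" else "&nbsp;" for c in prefix) + rest
-- ===== Notes on version B (the rewrite author's own statement) =====
-- stated objective: simpler
-- what changed: A interleaves scanning and output in one per-character loop with an early break and a slice; B first finds the end index of the leading space/tab run, then translates that prefix in one bulk join and appends the untouched rest.
import Mathlib
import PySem

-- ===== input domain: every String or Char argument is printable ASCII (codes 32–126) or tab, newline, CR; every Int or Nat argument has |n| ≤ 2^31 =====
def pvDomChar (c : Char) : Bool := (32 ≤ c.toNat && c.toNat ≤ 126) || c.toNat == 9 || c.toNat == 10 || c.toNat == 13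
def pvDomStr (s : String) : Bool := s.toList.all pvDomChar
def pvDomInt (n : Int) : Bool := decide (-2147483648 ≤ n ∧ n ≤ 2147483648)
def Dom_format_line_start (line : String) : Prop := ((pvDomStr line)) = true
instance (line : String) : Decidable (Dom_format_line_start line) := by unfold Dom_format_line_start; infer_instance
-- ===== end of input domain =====

-- B separates locating the leading space/tab run from translating it (boundary search, then a bulk join),
-- replacing A's interleaved per-character accumulate-or-break loop; objective: simpler.


-- ===== PORT A =====
-- A's for-loop: accumulate an entity per leading space/tab, on the first other
-- character append line[i:] and break. line[i:] is PySem.List.slice (exact).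
def pvALoop (line : List Char) : List Char → Nat → List Char → List Char
  | [], _, result => result
  | c :: cs, i, result =>
    if c = ' ' then pvALoop line cs (i + 1) (result ++ "&nbsp;".toList)
    else if c = '\t' then pvALoop line cs (i + 1) (result ++ "&nbsp;&nbsp;&nbsp;".toList)
    else result ++ PySem.List.slice line (some (i : Int)) none

def format_line_start (line : String) : String :=
  String.mk (pvALoop line.toList line.toList 0 [])

-- ===== PORT B =====
-- B's while loop: advance i while line[i] is ' ' or '\t'.
def pvWsEnd : List Char → Nat
  | [] => 0
  | c :: cs => if c = ' ' ∨ c = '\t' then pvWsEnd cs + 1 else 0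

def format_line_start_alt (line : String) : String :=
  let l := line.toList
  let i := pvWsEnd l
  -- prefix = line[:i], rest = line[i:] (i is in range, so take/drop are exact);
  -- "".join(generator) over the prefix is flatMap.
  String.mk ((l.take i).flatMap
      (fun c => if c = '\t' then "&nbsp;&nbsp;&nbsp;".toList else "&nbsp;".toList)
    ++ l.drop i)

-- ===== PRECONDITION & SPEC =====
def Spec_format_line_start (line : String) (out : String) : Prop := out = format_line_start_alt line
instance (line : String) (out : String) : Decidable (Spec_format_line_start line out) := by unfold Spec_format_line_start; infer_instance

-- ===== CLAIM (what is proved, stated in full; the proofs are below) =====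
def Claim_equal_format_line_start : Prop := ∀ (line : String), Dom_format_line_start line → Spec_format_line_start line (format_line_start line)

-- ===== LEMMAS AND PROOFS =====
theorem pvALoop_eq (line : List Char) :
    ∀ (cs : List Char) (i : Nat) (acc : List Char), cs = line.drop i →
      pvALoop line cs i acc =
        acc ++ (cs.take (pvWsEnd cs)).flatMap
            (fun c => if c = '\t' then "&nbsp;&nbsp;&nbsp;".toList else "&nbsp;".toList)
          ++ cs.drop (pvWsEnd cs) := by
  intro cs
  induction cs with
  | nil => intro i acc _; simp [pvALoop, pvWsEnd]
  | cons c cs ih =>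
    intro i acc h
    have hdrop : cs = line.drop (i + 1) := by
      have : line.drop (i + 1) = (line.drop i).drop 1 := by
        rw [List.drop_drop]
      rw [this, ← h]
      simp
    by_cases hsp : c = ' '
    · subst hsp
      simp [pvALoop, pvWsEnd, ih (i + 1) _ hdrop, List.append_assoc]
    · by_cases htab : c = '\t'
      · subst htab
        simp [pvALoop, pvWsEnd, ih (i + 1) _ hdrop, List.append_assoc]
      · have hor : ¬ (c = ' ' ∨ c = '\t') := by
          rintro (h' | h') <;> [exact hsp h'; exact htab h']
        simp only [pvALoop, if_neg hsp, if_neg htab, pvWsEnd, if_neg hor]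
        rw [PySem.List.slice_from]
        · simp [← h]
        · exact Int.natCast_nonneg i

-- ===== VERDICT (by name: the statement is the Claim_ definition above) =====
theorem format_line_start_spec : Claim_equal_format_line_start := by
  intro line _
  unfold Spec_format_line_start format_line_start format_line_start_alt
  rw [pvALoop_eq line.toList line.toList 0 [] (by simp)]
  simp
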